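-- pv_equiv track=rewrite | github.com/yaroot/scripts | ad_block_gen.py | filter_before_line
-- ===== SOURCE A (Python) =====
-- from typing import Optional, List
--
-- def filter_before_line(content: List[str], line: str):
--     xs = []
--     passing = True
--     for x in content:
--         if not passing:
--             xs.append(x)
--         else:
--             if x == line:
--                 passing = False
--             pass
--     return xs
-- ===== SOURCE B (Python) =====
-- from typing import Optional, List
--
-- def filter_before_line(content: List[str], line: str):
--     try:
--         return content[content.index(line) + 1:]
--     except ValueError:
--         return []
-- ===== Notes on version B (the rewrite author's own statement) =====
-- stated objective: simpler
-- what changed: Replaces the boolean-flag loop with per-element conditional append by locating the first occurrence once and returning the tail slice after it (empty list if absent).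
import Mathlib
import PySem

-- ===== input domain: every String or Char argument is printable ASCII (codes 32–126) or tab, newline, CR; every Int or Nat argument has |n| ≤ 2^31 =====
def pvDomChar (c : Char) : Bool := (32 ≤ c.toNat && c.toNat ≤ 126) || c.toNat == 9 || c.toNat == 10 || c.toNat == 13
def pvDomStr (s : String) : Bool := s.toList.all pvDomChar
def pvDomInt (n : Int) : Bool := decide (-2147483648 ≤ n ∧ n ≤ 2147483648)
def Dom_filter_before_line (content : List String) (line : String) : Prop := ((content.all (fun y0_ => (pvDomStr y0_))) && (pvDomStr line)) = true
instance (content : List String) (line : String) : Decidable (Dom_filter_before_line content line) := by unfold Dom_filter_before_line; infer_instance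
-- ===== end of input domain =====

-- B replaces A's boolean-flag loop by locating the first occurrence and slicing the tail (simpler decomposition; same cost).

-- ===== PORT A =====
-- flag loop: state (xs, passing); append x once passing is false, flip the flag at the first match
def filter_before_line (content : List String) (line : String) : List String :=
  (content.foldl
    (fun (st : List String × Bool) x =>
      if !st.2 then (st.1 ++ [x], st.2)
      else if x = line then (st.1, false) else st)
    ([], true)).1

-- ===== PORT B =====
-- content.index(line) then tail slice; [] when absent (ValueError branch)
def filter_before_line_alt (content : List String) (line : String) : List String :=
  match PySem.List.index? content line with
  | some i => PySem.List.slice content (some ((i : Int) + 1)) none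
  | none => []

-- ===== PRECONDITION & SPEC =====
def Spec_filter_before_line (content : List String) (line : String) (out : List String) : Prop := out = filter_before_line_alt content line
instance (content : List String) (line : String) (out : List String) : Decidable (Spec_filter_before_line content line out) := by unfold Spec_filter_before_line; infer_instance

-- ===== CLAIM (what is proved, stated in full; the proofs are below) =====
def Claim_equal_filter_before_line : Prop := ∀ (content : List String) (line : String), Dom_filter_before_line content line → Spec_filter_before_line content line (filter_before_line content line)

-- ===== LEMMAS AND PROOFS =====

-- once passing is false, A's loop appends every remaining element
theorem pv_foldl_false (content : List String) (line : String) (acc : List String) :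
    (content.foldl
      (fun (st : List String × Bool) x =>
        if !st.2 then (st.1 ++ [x], st.2)
        else if x = line then (st.1, false) else st)
      (acc, false)).1 = acc ++ content := by
  induction content generalizing acc with
  | nil => simp
  | cons x xs ih =>
    rw [List.foldl_cons]
    simp only [Bool.not_false, if_pos rfl, if_true]
    rw [ih (acc ++ [x])]
    simp

theorem pv_A_eq_B (content : List String) (line : String) :
    filter_before_line content line = filter_before_line_alt content line := by
  induction content with
  | nil => rfl
  | cons x xs ih =>
    by_cases hx : x = line
    · subst hx
      simp only [filter_before_line, filter_before_line_alt, List.foldl_cons]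
      rw [PySem.List.index?_cons_self]
      simp only [Bool.not_true, Bool.false_eq_true, if_false, if_pos rfl, if_true]
      rw [pv_foldl_false xs x []]
      simp [PySem.List.slice]
    · simp only [filter_before_line, filter_before_line_alt, List.foldl_cons] at *
      rw [PySem.List.index?_cons_of_ne xs hx]
      simp only [Bool.not_true, Bool.false_eq_true, if_false, if_neg hx]
      rw [ih]
      cases h : PySem.List.index? xs line with
      | none => simp [h]
      | some i =>
        simp only [Option.map_some]
        have h2 : ((i : Int) + 1) = (((i + 1 : Nat) : Int)) := by push_cast; ring
        have h3 : (((i + 1 : Nat) : Int) + 1) = (((i + 2 : Nat) : Int)) := by push_cast; ring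
        rw [h2, h3, PySem.List.slice_from_natCast, PySem.List.slice_from_natCast]
        simp [List.drop_succ_cons]

-- ===== VERDICT (by name: the statement is the Claim_ definition above) =====
theorem filter_before_line_spec : Claim_equal_filter_before_line := by
  intro content line _
  unfold Spec_filter_before_line
  exact pv_A_eq_B content line
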